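-- pv_equiv track=rewrite | github.com/drbilel35-sudo/AiCamera-1 | services/situation_analyzer.py | _determine_environment
-- ===== SOURCE A (Python) =====
-- def _determine_environment(object_counts):
--     """Determine the type of environment"""
--     indoor_objects = ['chair', 'table', 'furniture', 'computer', 'tv']
--     outdoor_objects = ['car', 'tree', 'sky', 'road']
--
--     indoor_score = sum(object_counts.get(obj, 0) for obj in indoor_objects)
--     outdoor_score = sum(object_counts.get(obj, 0) for obj in outdoor_objects)
--
--     if indoor_score > outdoor_score:
--         return "indoor"
--     elif outdoor_score > indoor_score:
--         return "outdoor"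
--     else:
--         return "unknown"
-- ===== SOURCE B (Python) =====
-- def _determine_environment(object_counts):
--     """Determine the type of environment"""
--     indoor = {'chair', 'table', 'furniture', 'computer', 'tv'}
--     outdoor = {'car', 'tree', 'sky', 'road'}
--     indoor_score = 0
--     outdoor_score = 0
--     for key, count in object_counts.items():
--         if key in indoor:
--             indoor_score += count
--         elif key in outdoor:
--             outdoor_score += count
--     if indoor_score > outdoor_score:
--         return "indoor"
--     elif outdoor_score > indoor_score:
--         return "outdoor"
--     else:
--         return "unknown"
-- ===== Notes on version B (the rewrite author's own statement) =====
-- stated objective: idiomatic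
-- what changed: Instead of two category-driven sums that each look every category word up in the dict, B makes one pass over the dict items, classifying each key against two constant sets and accumulating both scores in a single loop.
import Mathlib
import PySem

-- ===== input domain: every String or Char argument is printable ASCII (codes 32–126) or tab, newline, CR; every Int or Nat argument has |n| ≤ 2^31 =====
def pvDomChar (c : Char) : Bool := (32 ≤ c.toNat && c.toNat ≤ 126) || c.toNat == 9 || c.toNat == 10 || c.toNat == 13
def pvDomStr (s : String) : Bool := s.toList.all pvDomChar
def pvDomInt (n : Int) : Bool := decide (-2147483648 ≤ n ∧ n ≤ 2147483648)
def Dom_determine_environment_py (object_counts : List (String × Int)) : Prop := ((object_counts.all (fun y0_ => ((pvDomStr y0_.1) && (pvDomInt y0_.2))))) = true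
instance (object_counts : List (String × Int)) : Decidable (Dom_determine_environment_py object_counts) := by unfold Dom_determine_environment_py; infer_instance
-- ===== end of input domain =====

-- B classifies each dict item in one pass over two constant sets instead of summing dict lookups per category word; same comparisons.

-- ===== PORT A =====
def determine_environment_py (object_counts : List (String × Int)) : String :=
  let indoor_objects : List String := ["chair", "table", "furniture", "computer", "tv"]
  let outdoor_objects : List String := ["car", "tree", "sky", "road"]
  let d : PySem.Dict String Int := PySem.Dict.mk object_counts
  let indoor_score : Int := (indoor_objects.map (fun obj => d.getD obj 0)).sum
  let outdoor_score : Int := (outdoor_objects.map (fun obj => d.getD obj 0)).sum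
  if indoor_score > outdoor_score then "indoor"
  else if outdoor_score > indoor_score then "outdoor"
  else "unknown"

-- ===== PORT B =====
def pvIndoorSet : PySem.Set String := PySem.Set.ofList ["chair", "table", "furniture", "computer", "tv"]
def pvOutdoorSet : PySem.Set String := PySem.Set.ofList ["car", "tree", "sky", "road"]

def determine_environment_py_alt (object_counts : List (String × Int)) : String :=
  let scores : Int × Int := object_counts.foldl
    (fun acc kv =>
      if kv.1 ∈ pvIndoorSet then (acc.1 + kv.2, acc.2)
      else if kv.1 ∈ pvOutdoorSet then (acc.1, acc.2 + kv.2)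
      else acc)
    (0, 0)
  if scores.1 > scores.2 then "indoor"
  else if scores.2 > scores.1 then "outdoor"
  else "unknown"

-- ===== PRECONDITION & SPEC =====
-- Pre_ excludes association lists with duplicate keys: a Python dict cannot hold them, so such
-- lists correspond to no Python input and first-match vs. sum-all behaviour there is accidental.
def Pre_determine_environment_py (object_counts : List (String × Int)) : Prop :=
  (object_counts.map Prod.fst).Nodup
instance (object_counts : List (String × Int)) : Decidable (Pre_determine_environment_py object_counts) := by unfold Pre_determine_environment_py; infer_instance

def pvWitness_determine_environment_py : (List (String × Int)) := [("chair", 2), ("car", 1), ("dog", 7)]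

def Spec_determine_environment_py (object_counts : List (String × Int)) (out : String) : Prop := out = determine_environment_py_alt object_counts
instance (object_counts : List (String × Int)) (out : String) : Decidable (Spec_determine_environment_py object_counts out) := by unfold Spec_determine_environment_py; infer_instance

-- ===== CLAIM (what is proved, stated in full; the proofs are below) =====
def Claim_equal_determine_environment_py : Prop := ∀ (object_counts : List (String × Int)), Dom_determine_environment_py object_counts → Pre_determine_environment_py object_counts → Spec_determine_environment_py object_counts (determine_environment_py object_counts)

-- ===== LEMMAS AND PROOFS =====

-- A's per-category score, as computed by port A.
def pvScore (cat : List String) (l : List (String × Int)) : Int :=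
  (cat.map (fun obj => (PySem.Dict.mk l).getD obj 0)).sum

lemma pvGetD_mk_cons (k : String) (v : Int) (rest : List (String × Int)) (obj : String) :
    (PySem.Dict.mk ((k, v) :: rest)).getD obj 0
      = if k == obj then v else (PySem.Dict.mk rest).getD obj 0 := by
  simp [PySem.Dict.getD_eq_get?_getD, PySem.Dict.get?_mk_cons]
  split <;> rfl

lemma pvGetD_not_mem (rest : List (String × Int)) (k : String)
    (hk : k ∉ rest.map Prod.fst) : (PySem.Dict.mk rest).getD k 0 = 0 := by
  rw [PySem.Dict.getD_eq_get?_getD]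
  have : (PySem.Dict.mk rest).get? k = none := by
    rw [PySem.Dict.get?_eq_none_iff_not_mem_keys]
    simpa [PySem.Dict.keys] using hk
  simp [this]

lemma pvScore_cons (cat : List String) (hcat : cat.Nodup) (k : String) (v : Int)
    (rest : List (String × Int)) (hk : k ∉ rest.map Prod.fst) :
    pvScore cat ((k, v) :: rest) = (if k ∈ cat then v else 0) + pvScore cat rest := by
  induction cat with
  | nil => simp [pvScore]
  | cons o cat' ih =>
    have hcat' : cat'.Nodup := hcat.of_cons
    have ho : o ∉ cat' := (List.nodup_cons.mp hcat).1
    have hstep : ∀ (m : List (String × Int)),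
        pvScore (o :: cat') m = (PySem.Dict.mk m).getD o 0 + pvScore cat' m := by
      intro m; simp [pvScore]
    rw [hstep, hstep, pvGetD_mk_cons, ih hcat']
    by_cases hko : k = o
    · subst hko
      rw [pvGetD_not_mem rest k hk]
      simp [ho]
    · have hbeq : (k == o) = false := by simp [hko]
      simp only [hbeq, Bool.false_eq_true, if_false, List.mem_cons]
      by_cases hkc : k ∈ cat' <;> simp [hkc, hko] <;> omega

-- B's loop computes both of A's scores, shifted by the accumulator.
lemma pvLoop_eq (l : List (String × Int)) (hn : (l.map Prod.fst).Nodup) :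
    ∀ a b : Int,
      l.foldl (fun (acc : Int × Int) kv =>
        if kv.1 ∈ pvIndoorSet then (acc.1 + kv.2, acc.2)
        else if kv.1 ∈ pvOutdoorSet then (acc.1, acc.2 + kv.2)
        else acc) (a, b)
      = (a + pvScore ["chair", "table", "furniture", "computer", "tv"] l,
         b + pvScore ["car", "tree", "sky", "road"] l) := by
  induction l with
  | nil => intro a b; simp [pvScore]; decide
  | cons kv rest ih =>
    intro a b
    obtain ⟨k, v⟩ := kv
    have hk : k ∉ rest.map Prod.fst := (List.nodup_cons.mp hn).1
    have hn' : (rest.map Prod.fst).Nodup := by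
      simpa using (List.nodup_cons.mp (by simpa using hn)).2
    rw [pvScore_cons _ (by decide) k v rest hk, pvScore_cons _ (by decide) k v rest hk]
    simp only [List.foldl_cons]
    by_cases hi : k ∈ pvIndoorSet
    · have ho : k ∉ ["car", "tree", "sky", "road"] := by
        simp [pvIndoorSet, PySem.Set.ofList] at hi
        rcases hi with rfl | rfl | rfl | rfl | rfl <;> decide
      have hi' : k ∈ ["chair", "table", "furniture", "computer", "tv"] := by
        simpa [pvIndoorSet, PySem.Set.ofList] using hi
      simp only [hi, if_pos]
      rw [ih hn' (a + v) b]
      simp [hi', ho]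
      omega
    · by_cases ho : k ∈ pvOutdoorSet
      · have hi' : k ∉ ["chair", "table", "furniture", "computer", "tv"] := by
          simpa [pvIndoorSet, PySem.Set.ofList] using hi
        have ho' : k ∈ ["car", "tree", "sky", "road"] := by
          simpa [pvOutdoorSet, PySem.Set.ofList] using ho
        simp only [hi, ho, if_neg, if_pos, not_false_iff]
        rw [ih hn' a (b + v)]
        simp [hi', ho']
        omega
      · have hi' : k ∉ ["chair", "table", "furniture", "computer", "tv"] := by
          simpa [pvIndoorSet, PySem.Set.ofList] using hi
        have ho' : k ∉ ["car", "tree", "sky", "road"] := by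
          simpa [pvOutdoorSet, PySem.Set.ofList] using ho
        simp only [hi, ho, if_neg, not_false_iff]
        rw [ih hn' a b]
        simp [hi', ho']

-- ===== VERDICT (by name: the statement is the Claim_ definition above) =====
theorem determine_environment_py_spec : Claim_equal_determine_environment_py := by
  intro l _ hpre
  unfold Spec_determine_environment_py determine_environment_py determine_environment_py_alt
  rw [pvLoop_eq l hpre 0 0]
  simp [pvScore]
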